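-- pv_equiv track=rewrite | github.com/stenknutsen/HomeGrownPOSTagger | PhaseFourTagging.py | N_UNK_that_DT_Tagger
-- ===== SOURCE A (Python) =====
-- def N_UNK_that_DT_Tagger(sent):
--     sentToReturn = []
--     skip = 0
--
--     for i in range(len(sent)):
--
--         if skip>0:
--             skip = skip -1
--             continue
--
--
--         if (i)<0 | (i+3)>=len(sent):
--             sentToReturn += [sent[i]]
--             continue
--
--         leftContext = sent[i]
--         leftTarget = sent[i+1]
--         rightTarget = sent[i+2]
--         rightContext = sent[i+3]
--
--
--         if (leftContext[1].startswith("N"))&(leftTarget[1]=="UNK")&(rightTarget[1]=="UNK")&(rightTarget[0].lower()=="that")&(rightContext[1]=="DT"):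
--
--             sentToReturn += [leftContext]
--
--             newTup = (leftTarget[0], "V")
--             sentToReturn += [newTup]
--
--             newTup = (rightTarget[0], "IN")
--             sentToReturn += [newTup]
--
--             sentToReturn += [rightContext]
--             skip = 3
--
--         else:
--             sentToReturn += [leftContext]
--
--     return sentToReturn
-- ===== SOURCE B (Python) =====
-- def _window_matches(sent, i):
--     return (sent[i][1].startswith("N")
--             and sent[i + 1][1] == "UNK"
--             and sent[i + 2][1] == "UNK"
--             and sent[i + 2][0].lower() == "that"
--             and sent[i + 3][1] == "DT")
--
--
-- def N_UNK_that_DT_Tagger(sent):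
--     # Stage 1: all window starts whose 4-token window matches the pattern.
--     cand = [i for i in range(len(sent) - 3) if _window_matches(sent, i)]
--     # Stage 2: greedy left-to-right selection of non-overlapping windows.
--     starts = []
--     for i in cand:
--         if not starts or i >= starts[-1] + 4:
--             starts.append(i)
--     # Stage 3: the output is the sentence with only the two middle tags rewritten.
--     out = list(sent)
--     for i in starts:
--         out[i + 1] = (sent[i + 1][0], "V")
--         out[i + 2] = (sent[i + 2][0], "IN")
--     return out
-- ===== Notes on version B (the rewrite author's own statement) =====
-- stated objective: alternative
-- what changed: Replaces A's interleaved emit/skip scan by three staged passes: collect all matching window starts, greedily select non-overlapping ones, then rewrite only the two middle tags of each selected window in a copy of the sentence (using the fact that A's output is the input with those tags retagged).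
import Mathlib
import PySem

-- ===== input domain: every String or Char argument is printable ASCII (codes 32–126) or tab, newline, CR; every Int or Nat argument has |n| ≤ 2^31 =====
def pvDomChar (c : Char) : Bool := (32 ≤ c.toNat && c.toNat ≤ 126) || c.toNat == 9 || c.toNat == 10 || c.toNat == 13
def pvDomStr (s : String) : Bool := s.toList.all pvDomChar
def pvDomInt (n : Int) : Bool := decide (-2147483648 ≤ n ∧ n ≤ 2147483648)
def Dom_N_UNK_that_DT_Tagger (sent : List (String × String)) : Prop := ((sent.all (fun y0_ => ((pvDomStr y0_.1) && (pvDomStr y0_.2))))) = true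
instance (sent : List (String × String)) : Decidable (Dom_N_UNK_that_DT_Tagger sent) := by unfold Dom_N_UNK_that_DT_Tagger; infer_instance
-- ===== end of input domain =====

-- B replaces A's interleaved emit/skip scan by three staged passes (collect matching
-- window starts, greedily pick non-overlapping ones, retag the two middle tokens of
-- each picked window in a copy of the sentence); objective: alternative decomposition.


-- ===== PORT A =====
-- loop body of A's 'for i in range(len(sent))'; state = (sentToReturn, skip)
def pvStepA (sent : List (String × String)) (st : List (String × String) × Nat) (i : Nat) :
    List (String × String) × Nat :=
  let (sentToReturn, skip) := st
  if skip > 0 then (sentToReturn, skip - 1)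
  else
  -- Python's '(i)<0 | (i+3)>=len(sent)' parses as the chained comparison
  -- i < (0 | (i+3)) >= len(sent), i.e. i < i+3 ∧ i+3 ≥ len(sent); ported literally:
  if i < (0 ||| (i + 3)) ∧ (0 ||| (i + 3)) ≥ sent.length then
    (sentToReturn ++ [sent.getD i ("", "")], skip)
  else
    let leftContext := sent.getD i ("", "")
    let leftTarget := sent.getD (i + 1) ("", "")
    let rightTarget := sent.getD (i + 2) ("", "")
    let rightContext := sent.getD (i + 3) ("", "")
    if PySem.Str.startswith leftContext.2 "N" && (leftTarget.2 == "UNK") &&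
        (rightTarget.2 == "UNK") && (PySem.Str.lower rightTarget.1 == "that") &&
        (rightContext.2 == "DT") then
      (sentToReturn ++ [leftContext] ++ [(leftTarget.1, "V")] ++ [(rightTarget.1, "IN")] ++ [rightContext], 3)
    else
      (sentToReturn ++ [leftContext], skip)

def N_UNK_that_DT_Tagger (sent : List (String × String)) : List (String × String) :=
  ((List.range sent.length).foldl (pvStepA sent) ([], 0)).1

-- ===== PORT B =====
-- Source B's helper _window_matches(sent, i) (all indices i..i+3 are in range when used)
def pvMatch (sent : List (String × String)) (i : Nat) : Bool :=
  PySem.Str.startswith (sent.getD i ("", "")).2 "N" &&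
  ((sent.getD (i + 1) ("", "")).2 == "UNK") &&
  ((sent.getD (i + 2) ("", "")).2 == "UNK") &&
  (PySem.Str.lower (sent.getD (i + 2) ("", "")).1 == "that") &&
  ((sent.getD (i + 3) ("", "")).2 == "DT")

-- stage-2 loop body: 'if not starts or i >= starts[-1] + 4: starts.append(i)'
def pvGreedyStep (starts : List Nat) (i : Nat) : List Nat :=
  match starts.getLast? with
  | none => starts ++ [i]
  | some t => if t + 4 ≤ i then starts ++ [i] else starts

-- stage-3 loop body: 'out[i+1] = (sent[i+1][0], "V"); out[i+2] = (sent[i+2][0], "IN")'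
-- (both indices are in range for every selected start, so List.set is exact here)
def pvRewriteStep (sent : List (String × String)) (out : List (String × String)) (i : Nat) :
    List (String × String) :=
  (out.set (i + 1) ((sent.getD (i + 1) ("", "")).1, "V")).set (i + 2)
    ((sent.getD (i + 2) ("", "")).1, "IN")

def N_UNK_that_DT_Tagger_alt (sent : List (String × String)) : List (String × String) :=
  let cand := (List.range (sent.length - 3)).filter (pvMatch sent)
  let starts := cand.foldl pvGreedyStep []
  starts.foldl (pvRewriteStep sent) sent

-- ===== PRECONDITION & SPEC =====
def Spec_N_UNK_that_DT_Tagger (sent : List (String × String)) (out : List (String × String)) : Prop := out = N_UNK_that_DT_Tagger_alt sent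
instance (sent : List (String × String)) (out : List (String × String)) : Decidable (Spec_N_UNK_that_DT_Tagger sent out) := by unfold Spec_N_UNK_that_DT_Tagger; infer_instance

-- ===== CLAIM (what is proved, stated in full; the proofs are below) =====
def Claim_equal_N_UNK_that_DT_Tagger : Prop := ∀ (sent : List (String × String)), Dom_N_UNK_that_DT_Tagger sent → Spec_N_UNK_that_DT_Tagger sent (N_UNK_that_DT_Tagger sent)

-- ===== LEMMAS AND PROOFS =====

-- proof-only intermediate: the emit/skip pass, written as a jumping recursion
def pvGoB (sent : List (String × String)) (i : Nat) : List (String × String) :=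
  if h : i < sent.length then
    if i + 3 < sent.length && pvMatch sent i then
      sent.getD i ("", "") :: ((sent.getD (i + 1) ("", "")).1, "V") ::
        ((sent.getD (i + 2) ("", "")).1, "IN") :: sent.getD (i + 3) ("", "") :: pvGoB sent (i + 4)
    else
      sent.getD i ("", "") :: pvGoB sent (i + 1)
  else []
termination_by sent.length - i
decreasing_by all_goals omega

-- proof-only intermediate: greedy selected window starts, as a jumping recursion
def pvG (sent : List (String × String)) (i : Nat) : List Nat :=
  if i + 3 < sent.length then
    if pvMatch sent i then i :: pvG sent (i + 4) else pvG sent (i + 1)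
  else []
termination_by sent.length - i
decreasing_by all_goals omega

-- candidates ≥ i
def pvCands (sent : List (String × String)) (i : Nat) : List Nat :=
  (List.range' i (sent.length - 3 - i)).filter (pvMatch sent)

-- greedy selection with an optional 'last picked' threshold
def pvGsel : Option Nat → List Nat → List Nat
  | _, [] => []
  | none, x :: l => x :: pvGsel (some x) l
  | some t, x :: l => if t + 4 ≤ x then x :: pvGsel (some x) l else pvGsel (some t) l

lemma pvSkipRun (sent : List (String × String)) :
    ∀ (l : List Nat) (acc : List (String × String)),
      l.foldl (pvStepA sent) (acc, l.length) = (acc, 0) := by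
  intro l
  induction l with
  | nil => intro acc; rfl
  | cons x xs ih =>
      intro acc
      simp only [List.foldl_cons, List.length_cons]
      have : pvStepA sent (acc, xs.length + 1) x = (acc, xs.length) := by
        simp [pvStepA]
      rw [this, ih]

-- A's fold from index i with skip 0 builds acc ++ pvGoB sent i
lemma pvMainA (sent : List (String × String)) :
    ∀ (k i : Nat) (acc : List (String × String)), k = sent.length - i →
      ((List.range' i k).foldl (pvStepA sent) (acc, 0)).1 = acc ++ pvGoB sent i := by
  intro k
  induction k using Nat.strong_induction_on with
  | _ k ih =>
    intro i acc hk
    match k, hk with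
    | 0, hk =>
        have hi : ¬ i < sent.length := by omega
        simp [pvGoB, hi]
    | (j+1), hk =>
        have hi : i < sent.length := by omega
        rw [List.range'_succ, List.foldl_cons]
        by_cases hg : i + 3 ≥ sent.length
        · have hgp : i < (0 ||| (i + 3)) ∧ (0 ||| (i + 3)) ≥ sent.length := by
            rw [Nat.zero_or]; exact ⟨by omega, hg⟩
          have hA : pvStepA sent (acc, 0) i = (acc ++ [sent.getD i ("", "")], 0) := by
            simp only [pvStepA]
            rw [if_neg (lt_irrefl 0), if_pos hgp]
          rw [hA, ih j (by omega) (i+1) _ (by omega)]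
          have hnl : ¬ i + 3 < sent.length := by omega
          have hB : pvGoB sent i = sent.getD i ("", "") :: pvGoB sent (i + 1) := by
            rw [pvGoB, dif_pos hi, if_neg (by simp [hnl])]
          rw [hB]; simp
        · replace hg : i + 3 < sent.length := by omega
          have hng : ¬ (i < (0 ||| (i + 3)) ∧ (0 ||| (i + 3)) ≥ sent.length) := by
            rw [Nat.zero_or]; omega
          have hL : decide (i + 3 < sent.length) = true := by simp [hg]
          by_cases hcond : pvMatch sent i = true
          · have hA : pvStepA sent (acc, 0) i =
                (acc ++ [sent.getD i ("", "")] ++ [((sent.getD (i+1) ("", "")).1, "V")] ++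
                  [((sent.getD (i+2) ("", "")).1, "IN")] ++ [sent.getD (i+3) ("", "")], 3) := by
              simp only [pvStepA]
              rw [if_neg (lt_irrefl 0), if_neg hng, if_pos (by simpa [pvMatch] using hcond)]
            rw [hA]
            have hsplit : List.range' (i+1) j = List.range' (i+1) 3 ++ List.range' (i+4) (j-3) := by
              have h3 : j = 3 + (j - 3) := by omega
              conv_lhs => rw [h3]
              exact (@List.range'_append_1 (i+1) 3 (j-3)).symm
            rw [hsplit, List.foldl_append]
            have hrun : (List.range' (i+1) 3).foldl (pvStepA sent)
                (acc ++ [sent.getD i ("", "")] ++ [((sent.getD (i+1) ("", "")).1, "V")] ++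
                  [((sent.getD (i+2) ("", "")).1, "IN")] ++ [sent.getD (i+3) ("", "")], 3) =
                (acc ++ [sent.getD i ("", "")] ++ [((sent.getD (i+1) ("", "")).1, "V")] ++
                  [((sent.getD (i+2) ("", "")).1, "IN")] ++ [sent.getD (i+3) ("", "")], 0) := by
              have := pvSkipRun sent (List.range' (i+1) 3)
              simpa using this _
            rw [hrun, ih (j-3) (by omega) (i+4) _ (by omega)]
            have hB : pvGoB sent i = sent.getD i ("", "") :: ((sent.getD (i + 1) ("", "")).1, "V") ::
                ((sent.getD (i + 2) ("", "")).1, "IN") :: sent.getD (i + 3) ("", "") ::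
                pvGoB sent (i + 4) := by
              rw [pvGoB, dif_pos hi, if_pos (by rw [hL, Bool.true_and]; exact hcond)]
            rw [hB]; simp
          · have hA : pvStepA sent (acc, 0) i = (acc ++ [sent.getD i ("", "")], 0) := by
              simp only [pvStepA]
              rw [if_neg (lt_irrefl 0), if_neg hng, if_neg (by simpa [pvMatch] using hcond)]
            rw [hA, ih j (by omega) (i+1) _ (by omega)]
            have hB : pvGoB sent i = sent.getD i ("", "") :: pvGoB sent (i + 1) := by
              rw [pvGoB, dif_pos hi, if_neg (by rw [hL, Bool.true_and]; exact hcond)]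
            rw [hB]; simp

-- stage 2's foldl is pvGsel of the last picked start
lemma pvGreedyFold (l : List Nat) : ∀ (acc : List Nat),
    l.foldl pvGreedyStep acc = acc ++ pvGsel acc.getLast? l := by
  induction l with
  | nil => intro acc; simp [pvGsel]
  | cons x xs ih =>
      intro acc
      rw [List.foldl_cons]
      cases hlast : acc.getLast? with
      | none =>
          have hacc : acc = [] := List.getLast?_eq_none_iff.mp hlast
          subst hacc
          simp [pvGreedyStep, pvGsel, ih]
      | some t =>
          simp only [pvGreedyStep, hlast]
          by_cases h : t + 4 ≤ x
          · rw [if_pos h, ih, List.getLast?_concat]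
            simp [pvGsel, h]
          · rw [if_neg h, ih, hlast]
            simp [pvGsel, h]

lemma pvGsel_skip (t : Nat) : ∀ (l1 l2 : List Nat), (∀ x ∈ l1, x < t + 4) →
    pvGsel (some t) (l1 ++ l2) = pvGsel (some t) l2 := by
  intro l1
  induction l1 with
  | nil => intro l2 _; rfl
  | cons a l ih =>
      intro l2 h
      have ha : a < t + 4 := h a (by simp)
      simp only [List.cons_append, pvGsel, if_neg (by omega : ¬ t + 4 ≤ a)]
      exact ih l2 (fun x hx => h x (by simp [hx]))

lemma pvCands_nil (sent : List (String × String)) (i : Nat) (h : ¬ i + 3 < sent.length) :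
    pvCands sent i = [] := by
  unfold pvCands
  have : sent.length - 3 - i = 0 := by omega
  simp [this]

lemma pvCands_cons (sent : List (String × String)) (i : Nat) (h : i + 3 < sent.length) :
    pvCands sent i = (if pvMatch sent i then [i] else []) ++ pvCands sent (i + 1) := by
  unfold pvCands
  have h1 : sent.length - 3 - i = (sent.length - 3 - (i + 1)) + 1 := by omega
  rw [h1, List.range'_succ, List.filter_cons]
  by_cases hm : pvMatch sent i <;> simp [hm]

-- elements of pvCands sent i are in [i, length-4]
lemma pvCands_mem (sent : List (String × String)) (i x : Nat) (hx : x ∈ pvCands sent i) :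
    i ≤ x ∧ x + 3 < sent.length := by
  unfold pvCands at hx
  have := List.of_mem_filter hx
  have hm := List.mem_of_mem_filter hx
  rw [List.mem_range'] at hm
  obtain ⟨k, hk, hke⟩ := hm
  omega

-- skipping past a picked start: candidates below i+4 are rejected
lemma pvGsel_jump (sent : List (String × String)) (i : Nat) :
    pvGsel (some i) (pvCands sent (i + 1)) = pvGsel (some i) (pvCands sent (i + 4)) := by
  by_cases h7 : i + 7 ≤ sent.length
  · have hm : sent.length - 3 - (i + 1) = 3 + (sent.length - 3 - (i + 4)) := by omega
    have hsplit : List.range' (i+1) (sent.length - 3 - (i+1)) =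
        List.range' (i+1) 3 ++ List.range' (i+4) (sent.length - 3 - (i+4)) := by
      rw [hm]; exact (@List.range'_append_1 (i+1) 3 (sent.length - 3 - (i+4))).symm
    unfold pvCands
    rw [hsplit, List.filter_append]
    apply pvGsel_skip
    intro x hx
    have := List.mem_of_mem_filter hx
    rw [List.mem_range'] at this
    obtain ⟨k, hk, hke⟩ := this
    omega
  · have h2 : pvCands sent (i + 4) = [] := pvCands_nil sent (i+4) (by omega)
    rw [h2]
    have : pvCands sent (i + 1) = pvCands sent (i + 1) ++ [] := by simp
    rw [this]
    apply pvGsel_skip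
    intro x hx
    have := pvCands_mem sent (i+1) x hx
    omega

-- greedy over all candidates ≥ i is pvG i
lemma pvGreedyMain (sent : List (String × String)) :
    ∀ (k i : Nat), k = sent.length - i → pvGsel none (pvCands sent i) = pvG sent i := by
  intro k
  induction k using Nat.strong_induction_on with
  | _ k ih =>
    intro i hk
    by_cases h : i + 3 < sent.length
    · rw [pvCands_cons sent i h]
      by_cases hm : pvMatch sent i = true
      · rw [if_pos hm]
        simp only [List.cons_append, List.nil_append, pvGsel]
        rw [pvGsel_jump sent i]
        have hnone : pvGsel (some i) (pvCands sent (i + 4)) = pvGsel none (pvCands sent (i + 4)) := by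
          cases hc : pvCands sent (i + 4) with
          | nil => rfl
          | cons x l =>
              have hx : x ∈ pvCands sent (i + 4) := by rw [hc]; simp
              have := pvCands_mem sent (i+4) x hx
              simp only [pvGsel, if_pos (by omega : i + 4 ≤ x)]
        rw [hnone, ih (sent.length - (i+4)) (by omega) (i+4) rfl]
        conv_rhs => rw [pvG]
        rw [if_pos h, if_pos hm]
      · rw [if_neg hm]
        simp only [List.nil_append]
        rw [ih (sent.length - (i+1)) (by omega) (i+1) rfl]
        conv_rhs => rw [pvG]
        rw [if_pos h, if_neg hm]
    · rw [pvCands_nil sent i h, pvG, if_neg h]; rfl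

-- bounds of the selected starts
lemma pvG_mem (sent : List (String × String)) :
    ∀ (k i x : Nat), k = sent.length - i → x ∈ pvG sent i → i ≤ x ∧ x + 3 < sent.length := by
  intro k
  induction k using Nat.strong_induction_on with
  | _ k ih =>
    intro i x hk hx
    by_cases h : i + 3 < sent.length
    · rw [pvG, if_pos h] at hx
      by_cases hm : pvMatch sent i = true
      · rw [if_pos hm] at hx
        rcases List.mem_cons.mp hx with h1 | h1
        · omega
        · have := ih (sent.length - (i+4)) (by omega) (i+4) x rfl h1
          omega
      · rw [if_neg hm] at hx
        have := ih (sent.length - (i+1)) (by omega) (i+1) x rfl hx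
        omega
    · rw [pvG, if_neg h] at hx; simp at hx

-- the stage-3 fold commutes with a set at a position below every rewritten index
lemma pvRewComm (sent : List (String × String)) :
    ∀ (l : List Nat) (s : List (String × String)) (p : Nat) (a : String × String),
      (∀ j ∈ l, p < j + 1) →
      l.foldl (pvRewriteStep sent) (s.set p a) = (l.foldl (pvRewriteStep sent) s).set p a := by
  intro l
  induction l with
  | nil => intro s p a _; rfl
  | cons j l ih =>
      intro s p a h
      have hj : p < j + 1 := h j (by simp)
      simp only [List.foldl_cons]
      have hstep : pvRewriteStep sent (s.set p a) j = (pvRewriteStep sent s j).set p a := by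
        unfold pvRewriteStep
        rw [List.set_comm _ _ (by omega : p ≠ j + 1), List.set_comm _ _ (by omega : p ≠ j + 2)]
      rw [hstep, ih _ p a (fun x hx => h x (by simp [hx]))]

lemma pvRewLen (sent : List (String × String)) :
    ∀ (l : List Nat) (s : List (String × String)),
      (l.foldl (pvRewriteStep sent) s).length = s.length := by
  intro l
  induction l with
  | nil => intro s; rfl
  | cons j l ih =>
      intro s
      simp only [List.foldl_cons, ih, pvRewriteStep, List.length_set]

lemma pvRewGet (sent : List (String × String)) :
    ∀ (l : List Nat) (s : List (String × String)) (p : Nat),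
      (∀ j ∈ l, p < j + 1) →
      (l.foldl (pvRewriteStep sent) s)[p]? = s[p]? := by
  intro l
  induction l with
  | nil => intro s p _; rfl
  | cons j l ih =>
      intro s p h
      have hj : p < j + 1 := h j (by simp)
      simp only [List.foldl_cons]
      rw [ih _ p (fun x hx => h x (by simp [hx]))]
      unfold pvRewriteStep
      rw [List.getElem?_set_ne (by omega : j + 2 ≠ p), List.getElem?_set_ne (by omega : j + 1 ≠ p)]

-- getElem from getElem?
lemma pvGetOf {α : Type} {l : List α} {i : Nat} (h : i < l.length) {z : α}
    (hz : l[i]? = some z) : l[i] = z := by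
  rw [List.getElem?_eq_getElem h] at hz
  exact Option.some.inj hz

-- getD of an untouched position
lemma pvGetDEq {α : Type} {l m : List α} {i : Nat} (hi : i < l.length)
    (h : l[i]? = m[i]?) (d : α) : m.getD i d = l[i]'hi := by
  rw [List.getD_eq_getElem?_getD, ← h, List.getElem?_eq_getElem hi]
  rfl

-- the emit/skip pass equals the staged rewrite
lemma pvMainB (sent : List (String × String)) :
    ∀ (k i : Nat), k = sent.length - i →
      pvGoB sent i = ((pvG sent i).foldl (pvRewriteStep sent) sent).drop i := by
  intro k
  induction k using Nat.strong_induction_on with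
  | _ k ih =>
    intro i hk
    by_cases hi : i < sent.length
    · by_cases hg : (decide (i + 3 < sent.length) && pvMatch sent i) = true
      · have h3 : i + 3 < sent.length := by
          have := (Bool.and_eq_true _ _).mp hg
          simpa using this.1
        have hm : pvMatch sent i = true := ((Bool.and_eq_true _ _).mp hg).2
        have hGmem : ∀ j ∈ pvG sent (i + 4), j + 4 ≤ j + 4 ∧ i + 4 ≤ j := by
          intro j hj
          exact ⟨le_refl _, (pvG_mem sent (sent.length - (i+4)) (i+4) j rfl hj).1⟩
        set v : String × String := ((sent.getD (i+1) ("", "")).1, "V") with hv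
        set w : String × String := ((sent.getD (i+2) ("", "")).1, "IN") with hw
        set X := (pvG sent (i + 4)).foldl (pvRewriteStep sent) sent with hX
        have hXlen : X.length = sent.length := pvRewLen sent _ _
        have hfold : (pvG sent i).foldl (pvRewriteStep sent) sent =
            (X.set (i + 1) v).set (i + 2) w := by
          conv_lhs => rw [pvG]
          rw [if_pos h3, if_pos hm, List.foldl_cons]
          have hstep : pvRewriteStep sent sent i = (sent.set (i + 1) v).set (i + 2) w := rfl
          rw [hstep]
          rw [pvRewComm sent _ _ (i + 2) w (fun j hj => by have := (hGmem j hj).2; omega)]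
          rw [pvRewComm sent _ _ (i + 1) v (fun j hj => by have := (hGmem j hj).2; omega)]
        set Y := (X.set (i + 1) v).set (i + 2) w with hY
        have hYlen : Y.length = sent.length := by
          simp [hY, hXlen]
        have hXi : X[i]? = sent[i]? := by
          rw [hX]
          exact pvRewGet sent _ sent i (fun j hj => by have := (hGmem j hj).2; omega)
        have hXi3 : X[i+3]? = sent[i+3]? := by
          rw [hX]
          exact pvRewGet sent _ sent (i+3) (fun j hj => by have := (hGmem j hj).2; omega)
        have hYi : Y[i]? = sent[i]? := by
          rw [hY, List.getElem?_set_ne (by omega : i + 2 ≠ i),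
            List.getElem?_set_ne (by omega : i + 1 ≠ i), hXi]
        have hYi1 : Y[i+1]? = some v := by
          rw [hY, List.getElem?_set_ne (by omega : i + 2 ≠ i + 1), List.getElem?_set]
          simp [hXlen]
          omega
        have hYi2 : Y[i+2]? = some w := by
          rw [hY, List.getElem?_set]
          simp [hXlen]
          omega
        have hYi3 : Y[i+3]? = sent[i+3]? := by
          rw [hY, List.getElem?_set_ne (by omega : i + 2 ≠ i + 3),
            List.getElem?_set_ne (by omega : i + 1 ≠ i + 3), hXi3]
        have hdropY : Y.drop (i + 4) = X.drop (i + 4) := by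
          rw [hY, List.drop_set, if_pos (by omega : i + 2 < i + 4),
            List.drop_set, if_pos (by omega : i + 1 < i + 4)]
        rw [hfold]
        rw [List.drop_eq_getElem_cons (by omega : i < Y.length),
          List.drop_eq_getElem_cons (by omega : i + 1 < Y.length),
          List.drop_eq_getElem_cons (by omega : i + 2 < Y.length),
          List.drop_eq_getElem_cons (by omega : i + 3 < Y.length)]
        rw [pvGoB, dif_pos hi, if_pos hg]
        congr 1
        · exact pvGetDEq (by omega) hYi _
        congr 1
        · exact (pvGetOf (by omega) hYi1).symm
        congr 1
        · exact (pvGetOf (by omega) hYi2).symm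
        congr 1
        · exact pvGetDEq (by omega) hYi3 _
        · rw [hdropY, hX]
          exact ih (sent.length - (i + 4)) (by omega) (i + 4) rfl
      · have hGeq : pvG sent i = pvG sent (i + 1) := by
          by_cases h3 : i + 3 < sent.length
          · have hm : ¬ pvMatch sent i = true := by
              intro hmm
              exact hg (by simp [h3, hmm])
            conv_lhs => rw [pvG]
            rw [if_pos h3, if_neg hm]
          · conv_lhs => rw [pvG]
            rw [if_neg h3]
            conv_rhs => rw [pvG]
            rw [if_neg (by omega : ¬ i + 1 + 3 < sent.length)]
        set F := (pvG sent (i + 1)).foldl (pvRewriteStep sent) sent with hF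
        have hFlen : F.length = sent.length := pvRewLen sent _ _
        have hFi : F[i]? = sent[i]? := by
          rw [hF]
          exact pvRewGet sent _ sent i (fun j hj => by
            have := (pvG_mem sent (sent.length - (i+1)) (i+1) j rfl hj).1
            omega)
        rw [hGeq, ← hF, List.drop_eq_getElem_cons (by omega : i < F.length)]
        rw [pvGoB, dif_pos hi, if_neg hg]
        congr 1
        · exact pvGetDEq (by omega) hFi _
        · rw [hF]
          exact ih (sent.length - (i + 1)) (by omega) (i + 1) rfl
    · rw [pvGoB, dif_neg hi]
      have hG : pvG sent i = [] := by
        rw [pvG, if_neg (by omega : ¬ i + 3 < sent.length)]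
      rw [hG]
      exact (List.drop_eq_nil_of_le (by omega : sent.length ≤ i)).symm

-- ===== VERDICT (by name: the statement is the Claim_ definition above) =====
theorem N_UNK_that_DT_Tagger_spec : Claim_equal_N_UNK_that_DT_Tagger := by
  intro sent _
  unfold Spec_N_UNK_that_DT_Tagger N_UNK_that_DT_Tagger
  rw [List.range_eq_range']
  rw [pvMainA sent sent.length 0 [] (by omega), List.nil_append]
  rw [pvMainB sent sent.length 0 (by omega), List.drop_zero]
  rw [show N_UNK_that_DT_Tagger_alt sent =
      (((List.range (sent.length - 3)).filter (pvMatch sent)).foldl pvGreedyStep []).foldl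
        (pvRewriteStep sent) sent from rfl]
  have hcand : (List.range (sent.length - 3)).filter (pvMatch sent) = pvCands sent 0 := by
    unfold pvCands
    rw [List.range_eq_range', Nat.sub_zero]
  rw [hcand, pvGreedyFold, show (([] : List Nat)).getLast? = none from rfl, List.nil_append,
    pvGreedyMain sent sent.length 0 (by omega)]
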